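-- pv_equiv track=rewrite | github.com/kika1s1/A2SV | 2338-minimum-consecutive-cards-to-pick-up/minimum-consecutive-cards-to-pick-up.py | minimumCardPickup
-- ===== SOURCE A (Python) =====
-- from typing import List
--
-- def minimumCardPickup(cards: List[int]) -> int:
--     indexTable = {}
--     minim = float("inf")
--     for i, j in enumerate(cards):
--         if j not in indexTable:
--             indexTable[j] = i
--         else:
--             minim = min(minim,( i - indexTable[j])+1)
--             indexTable[j] = i
--     return -1 if minim == float("inf") else minim
-- ===== SOURCE B (Python) =====
-- from typing import List
--
-- def minimumCardPickup(cards: List[int]) -> int: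
--     # Pass 1: group all occurrence indices by card value.
--     positions = {}
--     for i, c in enumerate(cards):
--         positions.setdefault(c, []).append(i)
--     # Pass 2: min over consecutive occurrence pairs within each group.
--     best = None
--     for idxs in positions.values():
--         for a, b in zip(idxs, idxs[1:]):
--             gap = b - a + 1
--             if best is None or gap < best:
--                 best = gap
--     return -1 if best is None else best
-- ===== Notes on version B (the rewrite author's own statement) =====
-- stated objective: alternative
-- what changed: A keeps only the last-seen index per value and updates the minimum online inside the single scan; B separates the work into two differently-shaped passes: first it groups all occurrence indices per value into lists, then it minimises consecutive-pair gaps over the grouped lists.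
import Mathlib
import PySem

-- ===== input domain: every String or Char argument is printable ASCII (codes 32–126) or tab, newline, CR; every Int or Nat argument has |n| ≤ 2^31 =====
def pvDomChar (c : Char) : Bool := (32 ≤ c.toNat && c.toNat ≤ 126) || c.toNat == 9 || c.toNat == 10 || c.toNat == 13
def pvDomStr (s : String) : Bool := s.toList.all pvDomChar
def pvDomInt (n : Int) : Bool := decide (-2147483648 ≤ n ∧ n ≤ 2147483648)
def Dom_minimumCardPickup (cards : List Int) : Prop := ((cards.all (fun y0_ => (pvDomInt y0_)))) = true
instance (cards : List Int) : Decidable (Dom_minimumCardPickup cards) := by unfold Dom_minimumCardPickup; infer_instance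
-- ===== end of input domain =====

-- B groups all occurrence indices per value in one pass, then minimises consecutive gaps in a
-- second pass over the grouped lists (alternative decomposition; A updates the minimum online
-- from a last-seen-index table inside its single scan). Both are total; equivalence is proved on Dom.

-- ===== PORT A =====
-- loop body of A: dict lookup of the card, online min update with last-seen index, overwrite
def pvStepA (st : PySem.Dict Int Int × Option Int) (p : Int × Int) :
    PySem.Dict Int Int × Option Int :=
  match st.1.get? p.2 with
  | none => (st.1.insert p.2 p.1, st.2)                    -- j not in indexTable
  | some prev =>
      (st.1.insert p.2 p.1,
       some (match st.2 with                               -- min(minim, (i - indexTable[j]) + 1); none = float("inf")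
             | none => p.1 - prev + 1
             | some m => min m (p.1 - prev + 1)))

def minimumCardPickup (cards : List Int) : Int :=
  let st := (PySem.List.enumerate cards).foldl pvStepA (PySem.Dict.empty, none)
  match st.2 with
  | none => -1                                             -- minim == float("inf")
  | some m => m

-- ===== PORT B =====
-- positions.setdefault(c, []).append(i)
def pvBuildB (d : PySem.Dict Int (List Int)) (p : Int × Int) : PySem.Dict Int (List Int) :=
  d.modify p.2 [] (fun l => l ++ [p.1])

-- inner loop body: if best is None or gap < best: best = gap
def pvGapStep (m : Option Int) (ab : Int × Int) : Option Int :=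
  match m with
  | none => some (ab.2 - ab.1 + 1)
  | some b => if ab.2 - ab.1 + 1 < b then some (ab.2 - ab.1 + 1) else some b

-- for a, b in zip(idxs, idxs[1:])   (idxs[1:] on a list is List.drop 1; exact)
def pvScanB (m : Option Int) (idxs : List Int) : Option Int :=
  (idxs.zip (idxs.drop 1)).foldl pvGapStep m

def minimumCardPickup_alt (cards : List Int) : Int :=
  let positions := (PySem.List.enumerate cards).foldl pvBuildB PySem.Dict.empty
  let best := positions.values.foldl pvScanB none
  match best with
  | none => -1
  | some b => b

-- ===== PRECONDITION & SPEC =====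
def Spec_minimumCardPickup (cards : List Int) (out : Int) : Prop := out = minimumCardPickup_alt cards
instance (cards : List Int) (out : Int) : Decidable (Spec_minimumCardPickup cards out) := by unfold Spec_minimumCardPickup; infer_instance

-- ===== CLAIM (what is proved, stated in full; the proofs are below) =====
def Claim_equal_minimumCardPickup : Prop := ∀ (cards : List Int), Dom_minimumCardPickup cards → Spec_minimumCardPickup cards (minimumCardPickup cards)

-- ===== LEMMAS AND PROOFS =====

-- proof-side normal form of the min accumulator
def pvMinStep (m : Option Int) (g : Int) : Option Int :=
  some (match m with | none => g | some b => min b g)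

-- proof-side gap list of one occurrence list
def pvGaps : List Int → List Int
  | a :: b :: rest => (b - a + 1) :: pvGaps (b :: rest)
  | _ => []

lemma pvGapStep_eq (m : Option Int) (ab : Int × Int) :
    pvGapStep m ab = pvMinStep m (ab.2 - ab.1 + 1) := by
  cases m with
  | none => rfl
  | some b =>
      simp only [pvGapStep, pvMinStep]
      split_ifs with h <;> simp [min_def] <;> omega

lemma pvScanB_eq (l : List Int) : ∀ m, pvScanB m l = (pvGaps l).foldl pvMinStep m := by
  induction l with
  | nil => intro m; rfl
  | cons a tl ih =>
      cases tl with
      | nil => intro m; rfl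
      | cons b r =>
          intro m
          simp only [pvScanB, List.drop_succ_cons, List.drop_zero, List.zip_cons_cons,
            List.foldl_cons, pvGaps] at *
          rw [pvGapStep_eq]
          exact ih _

lemma pvMinStep_comm (L : List Int) : ∀ (m : Option Int) (g : Int),
    L.foldl pvMinStep (pvMinStep m g) = pvMinStep (L.foldl pvMinStep m) g := by
  induction L with
  | nil => intro m g; rfl
  | cons x L ih =>
      intro m g
      simp only [List.foldl_cons]
      rw [← ih]
      congr 1
      cases m with
      | none => simp [pvMinStep, min_comm]
      | some b => simp [pvMinStep, min_right_comm]

lemma pvGaps_concat (l : List Int) : ∀ (prev i : Int), l.getLast? = some prev →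
    pvGaps (l ++ [i]) = pvGaps l ++ [i - prev + 1] := by
  induction l with
  | nil => intro prev i h; simp at h
  | cons a tl ih =>
      intro prev i h
      cases tl with
      | nil => simp at h; subst h; rfl
      | cons b r =>
          rw [List.getLast?_cons_cons] at h
          simpa [pvGaps] using ih prev i h

-- values-pass of B equals the fold over the concatenated gap lists of the items
lemma pvSecond_eq (d : PySem.Dict Int (List Int)) (m : Option Int) :
    d.values.foldl pvScanB m
      = (d.items.flatMap (fun p => pvGaps p.2)).foldl pvMinStep m := by
  show (d.items.map (fun p => p.2)).foldl pvScanB m = _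
  rw [List.foldl_map, List.foldl_flatMap]
  exact PySem.List.foldl_congr_mem _ _ _ _ (fun acc x _ => pvScanB_eq x.2 acc)

-- replacing the unique entry of key j by its extension appends exactly the new gap
lemma pvReplace (j : Int) (l : List Int) (i g : Int)
    (hg : pvGaps (l ++ [i]) = pvGaps l ++ [g]) :
    ∀ (L : List (Int × List Int)) (m0 : Option Int),
      (L.map Prod.fst).Nodup → (j, l) ∈ L →
      ((L.map (fun p => if (p.1 == j) = true then (j, l ++ [i]) else p)).flatMap
          (fun p => pvGaps p.2)).foldl pvMinStep m0
        = pvMinStep ((L.flatMap (fun p => pvGaps p.2)).foldl pvMinStep m0) g := by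
  intro L
  induction L with
  | nil => intro m0 _ hmem; simp at hmem
  | cons p L ih =>
      intro m0 hnd hmem
      rw [List.map_cons, List.nodup_cons] at hnd
      obtain ⟨hp, hnd'⟩ := hnd
      rcases List.mem_cons.mp hmem with h | h
      · -- head is the j-entry; no j in the tail
        subst h
        have htail : L.map (fun p => if (p.1 == j) = true then (j, l ++ [i]) else p) = L := by
          conv_rhs => rw [← List.map_id L]
          apply List.map_congr_left
          intro q hq
          have hq1 : q.1 ∈ L.map Prod.fst := List.mem_map_of_mem hq
          have : q.1 ≠ j := fun he => hp (he ▸ hq1)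
          simp [this]
        simp only [List.map_cons, htail, List.flatMap_cons]
        rw [if_pos (show (((j, l) : Int × List Int).1 == j) = true by simp), hg]
        rw [List.foldl_append, List.foldl_append, List.foldl_append]
        simp only [List.foldl_cons, List.foldl_nil]
        exact pvMinStep_comm _ _ _
      · -- j-entry is in the tail; head key differs from j
        have hj : j ∈ L.map Prod.fst := by
          exact List.mem_map_of_mem h
        have hne : (p.1 == j) = false := by
          have : p.1 ≠ j := fun he => hp (he ▸ hj)
          simpa using this
        simp only [List.map_cons, hne, Bool.false_eq_true,
          List.flatMap_cons, List.foldl_append]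
        exact ih _ hnd' h
 
-- the main simulation: A's running minimum equals the gap-fold over B's grouping dict
lemma pvLoop (es : List (Int × Int)) :
    ∀ (t : PySem.Dict Int Int) (d : PySem.Dict Int (List Int)) (m m0 : Option Int),
      (∀ v, t.get? v = (d.getD v []).getLast?) →
      d.keys.Nodup →
      (∀ v, d.contains v = true → d.getD v [] ≠ []) →
      m = (d.items.flatMap (fun p => pvGaps p.2)).foldl pvMinStep m0 →
      (es.foldl pvStepA (t, m)).2
        = ((es.foldl pvBuildB d).items.flatMap (fun p => pvGaps p.2)).foldl pvMinStep m0 := by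
  induction es with
  | nil => intro t d m m0 h1 _ _ hm; simpa using hm
  | cons p es ih =>
      intro t d m m0 h1 hnd h3 hm
      obtain ⟨i, j⟩ := p
      by_cases hc : d.contains j = true
      · -- duplicate value: A takes the min-update branch, B extends the group in place
        have hlne : d.getD j [] ≠ [] := h3 j hc
        obtain ⟨prev, hprev⟩ : ∃ prev, (d.getD j []).getLast? = some prev := by
          cases hl : (d.getD j []).getLast? with
          | none => exact absurd (List.getLast?_eq_none_iff.mp hl) hlne
          | some prev => exact ⟨prev, rfl⟩
        have hgA : t.get? j = some prev := by rw [h1 j, hprev]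
        have hstep : pvStepA (t, m) (i, j)
            = (t.insert j i, pvMinStep m (i - prev + 1)) := by
          simp [pvStepA, hgA, pvMinStep]
        have hbuild : pvBuildB d (i, j) = d.insert j (d.getD j [] ++ [i]) := by
          simp [pvBuildB, PySem.Dict.modify]
        have hget : d.get? j = some (d.getD j []) := by
          rw [PySem.Dict.getD_eq_get?_getD]
          cases hq : d.get? j with
          | none =>
              exfalso
              rw [PySem.Dict.get?_eq_none_iff_contains] at hq
              rw [hq] at hc; exact absurd hc (by simp)
          | some w => simp
        simp only [List.foldl_cons, hstep, hbuild]
        apply ih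
        · intro v
          rw [PySem.Dict.get?_insert, PySem.Dict.getD_insert]
          split_ifs with hv
          · simp
          · exact h1 v
        · exact PySem.Dict.nodup_keys_insert _ _ _ hnd
        · intro v hv
          rw [PySem.Dict.getD_insert]
          split_ifs with h
          · simp
          · rw [PySem.Dict.contains_insert] at hv
            simp [h] at hv
            exact h3 v hv
        · rw [PySem.Dict.items_insert_of_contains _ _ hc]
          rw [pvReplace j (d.getD j []) i (i - prev + 1)
                (pvGaps_concat _ prev i hprev) d.items m0 hnd
                (PySem.Dict.mem_items_of_get?_eq_some d hget)]
          rw [hm]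
      · -- first occurrence of the value: A records it, B starts a fresh group; no new gap
        have hc' : d.contains j = false := by simpa using hc
        have hd0 : d.getD j [] = [] := PySem.Dict.getD_of_not_contains d [] hc'
        have hgA : t.get? j = none := by rw [h1 j, hd0]; rfl
        have hstep : pvStepA (t, m) (i, j) = (t.insert j i, m) := by
          simp [pvStepA, hgA]
        have hbuild : pvBuildB d (i, j) = d.insert j [i] := by
          simp [pvBuildB, PySem.Dict.modify, hd0]
        simp only [List.foldl_cons, hstep, hbuild]
        apply ih
        · intro v
          rw [PySem.Dict.get?_insert, PySem.Dict.getD_insert]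
          split_ifs with hv
          · rfl
          · exact h1 v
        · exact PySem.Dict.nodup_keys_insert _ _ _ hnd
        · intro v hv
          rw [PySem.Dict.getD_insert]
          split_ifs with h
          · simp
          · rw [PySem.Dict.contains_insert] at hv
            simp [h] at hv
            exact h3 v hv
        · rw [PySem.Dict.items_insert_of_not_contains _ _ hc']
          simp [pvGaps, hm]

-- ===== VERDICT (by name: the statement is the Claim_ definition above) =====
theorem minimumCardPickup_spec : Claim_equal_minimumCardPickup := by
  intro cards _
  show minimumCardPickup cards = minimumCardPickup_alt cards
  simp only [minimumCardPickup, minimumCardPickup_alt]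
  have h := pvLoop (PySem.List.enumerate cards) PySem.Dict.empty PySem.Dict.empty none none
    (by intro v; simp [PySem.Dict.get?_empty, PySem.Dict.getD_empty])
    PySem.Dict.nodup_keys_empty
    (by intro v hv; simp [PySem.Dict.contains_empty] at hv)
    (by simp [PySem.Dict.empty])
  rw [h, pvSecond_eq]
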